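-- pv_equiv track=rewrite | github.com/latha27/Python-Bootcamp | Function and karel/test.py | numValue
-- ===== SOURCE A (Python) =====
-- def numValue(bin):
--     val = 0
--     j = 0
--     for i in bin:
--         if (i==1):
--             val = val + pow(-2, j)
--         j = j + 1
--     return val
-- ===== SOURCE B (Python) =====
-- def numValue(bin):
--     val = 0
--     for i in reversed(bin):
--         val = val * (-2) + (1 if i == 1 else 0)
--     return val
-- ===== Notes on version B (the rewrite author's own statement) =====
-- stated objective: simpler
-- what changed: Replaces the index counter and per-digit pow(-2, j) with Horner's rule over the reversed list, maintaining a single running accumulator and no pow calls.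
import Mathlib
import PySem

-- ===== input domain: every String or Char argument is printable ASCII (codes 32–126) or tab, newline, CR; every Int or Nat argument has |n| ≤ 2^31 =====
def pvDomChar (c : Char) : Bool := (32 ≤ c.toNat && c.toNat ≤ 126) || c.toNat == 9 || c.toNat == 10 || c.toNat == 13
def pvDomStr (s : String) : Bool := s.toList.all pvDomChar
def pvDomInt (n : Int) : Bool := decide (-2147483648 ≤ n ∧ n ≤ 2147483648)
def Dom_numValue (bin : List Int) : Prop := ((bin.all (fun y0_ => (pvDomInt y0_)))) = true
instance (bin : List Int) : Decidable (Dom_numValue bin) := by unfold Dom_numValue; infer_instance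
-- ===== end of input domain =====

-- B re-evaluates the base-(-2) digit list by Horner's rule over the reversed list (one accumulator, no pow) — simpler, same cost.


-- ===== PORT A =====
-- A: indexed sum, adding pow(-2, j) for each digit equal to 1
def numValue (bin : List Int) : Int :=
  (bin.foldl (fun (s : Int × Int) i =>
      (if i == 1 then s.1 + (-2) ^ s.2.toNat else s.1, s.2 + 1)) (0, 0)).1

-- ===== PORT B =====
-- B: Horner's rule over the reversed list (no pow)
def numValue_alt (bin : List Int) : Int :=
  bin.reverse.foldl (fun val i => val * (-2) + (if i == 1 then 1 else 0)) 0

-- ===== PRECONDITION & SPEC =====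
def Spec_numValue (bin : List Int) (out : Int) : Prop := out = numValue_alt bin
instance (bin : List Int) (out : Int) : Decidable (Spec_numValue bin out) := by unfold Spec_numValue; infer_instance

-- ===== CLAIM (what is proved, stated in full; the proofs are below) =====
def Claim_equal_numValue : Prop := ∀ (bin : List Int), Dom_numValue bin → Spec_numValue bin (numValue bin)

-- ===== LEMMAS AND PROOFS =====

-- ===== VERDICT (by name: the statement is the Claim_ definition above) =====
-- B as a foldr (foldl over the reverse)
lemma alt_foldr (bin : List Int) :
    numValue_alt bin = bin.foldr (fun i v => v * (-2) + (if i == 1 then 1 else 0)) 0 := by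
  simp [numValue_alt, List.foldl_reverse]

-- A's loop from an arbitrary state, expressed via the foldr value
lemma a_loop (bin : List Int) (v j : Int) (hj : 0 ≤ j) :
    (bin.foldl (fun (s : Int × Int) i =>
        (if i == 1 then s.1 + (-2) ^ s.2.toNat else s.1, s.2 + 1)) (v, j)).1
      = v + (-2) ^ j.toNat * bin.foldr (fun i v => v * (-2) + (if i == 1 then 1 else 0)) 0 := by
  induction bin generalizing v j with
  | nil => simp
  | cons i t ih =>
    have hjt : (j + 1).toNat = j.toNat + 1 := by omega
    simp only [List.foldl_cons, List.foldr_cons]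
    rw [ih _ _ (by omega), hjt]
    by_cases h : i = 1 <;> simp [h] <;> ring

theorem numValue_spec : Claim_equal_numValue := by
  intro bin _
  unfold Spec_numValue numValue
  rw [alt_foldr, a_loop bin 0 0 le_rfl]
  simp
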